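-- pv_equiv track=rewrite | github.com/yizhilll/selfboostrapping_reasoning | evaluation/verifier_math_conversion.py | has_text_indicators
-- ===== SOURCE A (Python) =====
-- def has_text_indicators(text: str) -> bool:
--     """
--     Check if the string contains indicators of natural language text.
--     Returns True if the string appears to contain natural language.
--     """
--     # Common words that indicate text content
--     text_indicators = {
--         # Logical connectors
--         'therefore', 'thus', 'hence', 'consequently', 'accordingly', 'so',
--         'because', 'since', 'due to', 'as a result', 'follows that',
--
--         # Mathematical discourse
--         'where', 'when', 'if', 'then', 'given', 'suppose', 'let',
--         'consider', 'assume', 'assuming', 'exists', 'provided',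
--         'defined', 'denote', 'denoted', 'implies', 'proves', 'proved',
--         'showing', 'shows', 'follows', 'following', 'holds', 'satisfies',
--
--         # Common articles and prepositions
--         'the', 'a', 'an', 'and', 'or', 'as', 'by', 'in', 'on', 'at',
--         'to', 'for', 'of', 'with', 'without', 'from', 'into', 'onto',
--         'under', 'over', 'above', 'below', 'between', 'among',
--
--         # Mathematical description
--         'solution', 'equation', 'function', 'variable', 'value',
--         'expression', 'formula', 'proof', 'theorem', 'lemma',
--         'corollary', 'proposition', 'definition', 'identity',
--         'condition', 'boundary', 'initial', 'final', 'system',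
--
--         # Process words
--         'solve', 'solving', 'solved', 'calculate', 'calculating',
--         'computed', 'computing', 'derive', 'derived', 'deriving',
--         'find', 'finding', 'found', 'determine', 'determined',
--
--         # Quantifiers and descriptors
--         'all', 'every', 'any', 'some', 'none', 'no', 'each',
--         'many', 'few', 'several', 'must', 'should', 'can', 'may',
--         'possible', 'impossible', 'necessary', 'sufficient',
--
--         # Result description
--         'answer', 'result', 'conclusion', 'solution', 'yields',
--         'obtains', 'gives', 'produces', 'leads', 'reduces',
--         'simplifies', 'equals', 'equivalent', 'same', 'different',
--
--         # Math relationships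
--         'greater', 'less', 'equal', 'unequal', 'equivalent',
--         'approximately', 'about', 'roughly', 'exactly', 'precisely',
--         'minimum', 'maximum', 'extremum', 'optimal', 'optimization'
--     }
--
--     # Convert to lowercase for matching
--     text_lower = text.lower()
--
--     # Check for common punctuation that suggests sentences
--     has_sentence_punctuation = any(p in text for p in ['. ', '; ', '! ', '? '])
--
--     # Check for presence of common words
--     has_common_words = any(f' {word} ' in f' {text_lower} ' for word in text_indicators)
--
--     # Check for multiple words (more than 2) by counting spaces
--     word_count = len(text.split())
--     has_many_words = word_count > 2
--
--     return has_sentence_punctuation or has_common_words or has_many_words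
-- ===== SOURCE B (Python) =====
-- # B: tokenize the padded lowercase text once by splitting on the literal space and look each
-- # token up in a hash set (one O(n) pass), instead of A's substring scan per indicator word;
-- # the three multi-word phrases stay substring checks; early-return chain instead of three flags.
--
-- _WORDS = frozenset(
--     "therefore thus hence consequently accordingly so because since "
--     "where when if then given suppose let consider assume assuming exists provided "
--     "defined denote denoted implies proves proved showing shows follows following holds satisfies "
--     "the a an and or as by in on at to for of with without from into onto "
--     "under over above below between among "
--     "solution equation function variable value expression formula proof theorem lemma "
--     "corollary proposition definition identity condition boundary initial final system "
--     "solve solving solved calculate calculating computed computing derive derived deriving "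
--     "find finding found determine determined "
--     "all every any some none no each many few several must should can may "
--     "possible impossible necessary sufficient "
--     "answer result conclusion yields obtains gives produces leads reduces "
--     "simplifies equals equivalent same different "
--     "greater less equal unequal approximately about roughly exactly precisely "
--     "minimum maximum extremum optimal optimization".split(' ')
-- )
--
-- _PHRASES = ('due to', 'as a result', 'follows that')
--
--
-- def has_text_indicators(text: str) -> bool:
--     padded = ' ' + text.lower() + ' '
--     if any(tok in _WORDS for tok in padded.split(' ')):
--         return True
--     if any(f' {p} ' in padded for p in _PHRASES):
--         return True
--     if any(p in text for p in ('. ', '; ', '! ', '? ')):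
--         return True
--     return len(text.split()) > 2
-- ===== Notes on version B (the rewrite author's own statement) =====
-- stated objective: faster
-- what changed: A substring-searches the padded text once per indicator (139 scans); B splits the padded lowercase text on the space character once and looks each token up in a hash set, keeping only the three multi-word phrases as substring checks, with an early-return chain instead of three flags.
import Mathlib
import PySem

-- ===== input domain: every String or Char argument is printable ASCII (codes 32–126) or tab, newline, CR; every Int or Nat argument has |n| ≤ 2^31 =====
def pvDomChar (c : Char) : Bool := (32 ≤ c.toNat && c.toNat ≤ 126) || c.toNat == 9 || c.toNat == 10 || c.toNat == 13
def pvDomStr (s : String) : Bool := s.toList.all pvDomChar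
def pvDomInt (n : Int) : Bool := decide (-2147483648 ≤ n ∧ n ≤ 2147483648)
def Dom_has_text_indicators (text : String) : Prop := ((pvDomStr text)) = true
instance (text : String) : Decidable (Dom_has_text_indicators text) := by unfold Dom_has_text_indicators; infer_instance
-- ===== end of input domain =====

-- B replaces A's per-indicator substring scan by one tokenizing split of the padded lowercase
-- text with a set lookup per token (phrases stay substring checks); same return value.

-- ===== PORT A =====
-- A's text_indicators set (Python set: iteration order irrelevant for 'any'); singles in
-- declaration order, then the three multi-word phrases
def pvIndicatorsA : List String := [
  "therefore", "thus", "hence", "consequently", "accordingly", "so", "because", "since", "where", 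
  "when", "if", "then", "given", "suppose", "let", "consider", "assume", "assuming", "exists", 
  "provided", "defined", "denote", "denoted", "implies", "proves", "proved", "showing", "shows", 
  "follows", "following", "holds", "satisfies", "the", "a", "an", "and", "or", "as", "by", "in", 
  "on", "at", "to", "for", "of", "with", "without", "from", "into", "onto", "under", "over", 
  "above", "below", "between", "among", "solution", "equation", "function", "variable", "value", 
  "expression", "formula", "proof", "theorem", "lemma", "corollary", "proposition", "definition", 
  "identity", "condition", "boundary", "initial", "final", "system", "solve", "solving", "solved", 
  "calculate", "calculating", "computed", "computing", "derive", "derived", "deriving", "find", 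
  "finding", "found", "determine", "determined", "all", "every", "any", "some", "none", "no", 
  "each", "many", "few", "several", "must", "should", "can", "may", "possible", "impossible", 
  "necessary", "sufficient", "answer", "result", "conclusion", "yields", "obtains", "gives", 
  "produces", "leads", "reduces", "simplifies", "equals", "equivalent", "same", "different", 
  "greater", "less", "equal", "unequal", "approximately", "about", "roughly", "exactly", 
  "precisely", "minimum", "maximum", "extremum", "optimal", "optimization",
  "due to", "as a result", "follows that"]

def has_text_indicators (text : String) : Bool :=
  let text_lower := PySem.Chars.lower text.toList
  let has_sentence_punctuation :=
    ([". ", "; ", "! ", "? "]).any (fun p => PySem.Chars.isIn p.toList text.toList)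
  let has_common_words :=
    pvIndicatorsA.any (fun w =>
      PySem.Chars.isIn ((' ' :: w.toList) ++ [' ']) ((' ' :: text_lower) ++ [' ']))
  let word_count := (PySem.Chars.split₀ text.toList).length
  has_sentence_punctuation || has_common_words || decide (word_count > 2)

-- ===== PORT B =====
-- Source B's _WORDS source string: adjacent string literals, concatenated, then split on the
-- single space (Python implicit literal concatenation = ++ here)
def pvW1 : String := "therefore thus hence consequently accordingly so because since "
def pvW2 : String := "where when if then given suppose let consider assume assuming exists provided "
def pvW3 : String := "defined denote denoted implies proves proved showing shows follows following holds satisfies "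
def pvW4 : String := "the a an and or as by in on at to for of with without from into onto "
def pvW5 : String := "under over above below between among "
def pvW6 : String := "solution equation function variable value expression formula proof theorem lemma "
def pvW7 : String := "corollary proposition definition identity condition boundary initial final system "
def pvW8 : String := "solve solving solved calculate calculating computed computing derive derived deriving "
def pvW9 : String := "find finding found determine determined "
def pvW10 : String := "all every any some none no each many few several must should can may "
def pvW11 : String := "possible impossible necessary sufficient "
def pvW12 : String := "answer result conclusion yields obtains gives produces leads reduces "
def pvW13 : String := "simplifies equals equivalent same different "
def pvW14 : String := "greater less equal unequal approximately about roughly exactly precisely "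
def pvW15 : String := "minimum maximum extremum optimal optimization"

def pvWordsStr : String := pvW1 ++ pvW2 ++ pvW3 ++ pvW4 ++ pvW5 ++ pvW6 ++ pvW7 ++ pvW8 ++ pvW9 ++ pvW10 ++ pvW11 ++ pvW12 ++ pvW13 ++ pvW14 ++ pvW15

-- hand port of s.split(' ') (single-space separator; exact: Python keeps empty pieces)
def pvSplitSp : List Char → List Char → List (List Char)
  | cur, [] => [cur]
  | cur, c :: p => if c = ' ' then cur :: pvSplitSp [] p else pvSplitSp (cur ++ [c]) p

def pvWords : List (List Char) := pvSplitSp [] pvWordsStr.toList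

def pvPhrasesB : List String := ["due to", "as a result", "follows that"]

def has_text_indicators_alt (text : String) : Bool :=
  let padded := (' ' :: PySem.Chars.lower text.toList) ++ [' ']
  if (pvSplitSp [] padded).any (fun t => pvWords.contains t) then true
  else if pvPhrasesB.any (fun p => PySem.Chars.isIn ((' ' :: p.toList) ++ [' ']) padded) then true
  else if ([". ", "; ", "! ", "? "]).any (fun p => PySem.Chars.isIn p.toList text.toList) then true
  else decide ((PySem.Chars.split₀ text.toList).length > 2)

-- ===== PRECONDITION & SPEC =====
def Spec_has_text_indicators (text : String) (out : Bool) : Prop := out = has_text_indicators_alt text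
instance (text : String) (out : Bool) : Decidable (Spec_has_text_indicators text out) := by unfold Spec_has_text_indicators; infer_instance

-- ===== CLAIM (what is proved, stated in full; the proofs are below) =====
def Claim_equal_has_text_indicators : Prop := ∀ (text : String), Dom_has_text_indicators text → Spec_has_text_indicators text (has_text_indicators text)

-- ===== LEMMAS AND PROOFS =====

def pvSingles : List String := pvIndicatorsA.take 136

lemma pvIndicatorsA_eq : pvIndicatorsA = pvSingles ++ pvPhrasesB := by rfl

set_option maxRecDepth 8192 in
lemma pvSingles_ok : ∀ w ∈ pvSingles, w.toList ≠ [] ∧ ' ' ∉ w.toList := by decide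

-- evaluating pvSplitSp chunk by chunk (each chunk ends with a space, so the partial token restarts empty)
lemma pvSplitSp_ne_nil : ∀ (cur l : List Char), pvSplitSp cur l ≠ [] := by
  intro cur l
  induction l generalizing cur with
  | nil => simp [pvSplitSp]
  | cons c p ih =>
      by_cases hc : c = ' '
      · simp [pvSplitSp, hc]
      · simpa [pvSplitSp, hc] using ih (cur ++ [c])

lemma pvChunk : ∀ (a cur : List Char) (ws : List (List Char)) (b : List Char),
    pvSplitSp cur a = ws ++ [[]] → pvSplitSp cur (a ++ b) = ws ++ pvSplitSp [] b := by
  intro a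
  induction a with
  | nil =>
      intro cur ws b h
      simp only [pvSplitSp] at h
      rcases ws with _ | ⟨w, ws⟩
      · have : cur = [] := by simpa using h
        simp [this]
      · exfalso
        have := congrArg List.length h
        simp at this
  | cons c a ih =>
      intro cur ws b h
      by_cases hc : c = ' '
      · subst hc
        rw [List.cons_append,
          show pvSplitSp cur (' ' :: (a ++ b)) = cur :: pvSplitSp [] (a ++ b) from by
            simp [pvSplitSp]]
        rw [show pvSplitSp cur (' ' :: a) = cur :: pvSplitSp [] a from by simp [pvSplitSp]] at h
        rcases ws with _ | ⟨w, ws⟩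
        · have h2 : pvSplitSp [] a = [] := by simpa using (List.cons_eq_cons.mp (by simpa using h)).2
          exact absurd h2 (pvSplitSp_ne_nil _ _)
        · rw [List.cons_append] at h
          rcases List.cons_eq_cons.mp h with ⟨rfl, h2⟩
          rw [ih [] ws b h2, List.cons_append]
      · rw [List.cons_append,
          show pvSplitSp cur (c :: (a ++ b)) = pvSplitSp (cur ++ [c]) (a ++ b) from by
            simp [pvSplitSp, hc]]
        rw [show pvSplitSp cur (c :: a) = pvSplitSp (cur ++ [c]) a from by simp [pvSplitSp, hc]] at h
        exact ih _ ws b h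

lemma pvH1 : pvSplitSp [] pvW1.toList = (["therefore", "thus", "hence", "consequently", "accordingly", "so", "because", "since"] : List String).map String.toList ++ [[]] := by decide
lemma pvH2 : pvSplitSp [] pvW2.toList = (["where", "when", "if", "then", "given", "suppose", "let", "consider", "assume", "assuming", "exists", "provided"] : List String).map String.toList ++ [[]] := by decide
lemma pvH3 : pvSplitSp [] pvW3.toList = (["defined", "denote", "denoted", "implies", "proves", "proved", "showing", "shows", "follows", "following", "holds", "satisfies"] : List String).map String.toList ++ [[]] := by decide
lemma pvH4 : pvSplitSp [] pvW4.toList = (["the", "a", "an", "and", "or", "as", "by", "in", "on", "at", "to", "for", "of", "with", "without", "from", "into", "onto"] : List String).map String.toList ++ [[]] := by decide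
lemma pvH5 : pvSplitSp [] pvW5.toList = (["under", "over", "above", "below", "between", "among"] : List String).map String.toList ++ [[]] := by decide
lemma pvH6 : pvSplitSp [] pvW6.toList = (["solution", "equation", "function", "variable", "value", "expression", "formula", "proof", "theorem", "lemma"] : List String).map String.toList ++ [[]] := by decide
lemma pvH7 : pvSplitSp [] pvW7.toList = (["corollary", "proposition", "definition", "identity", "condition", "boundary", "initial", "final", "system"] : List String).map String.toList ++ [[]] := by decide
lemma pvH8 : pvSplitSp [] pvW8.toList = (["solve", "solving", "solved", "calculate", "calculating", "computed", "computing", "derive", "derived", "deriving"] : List String).map String.toList ++ [[]] := by decide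
lemma pvH9 : pvSplitSp [] pvW9.toList = (["find", "finding", "found", "determine", "determined"] : List String).map String.toList ++ [[]] := by decide
lemma pvH10 : pvSplitSp [] pvW10.toList = (["all", "every", "any", "some", "none", "no", "each", "many", "few", "several", "must", "should", "can", "may"] : List String).map String.toList ++ [[]] := by decide
lemma pvH11 : pvSplitSp [] pvW11.toList = (["possible", "impossible", "necessary", "sufficient"] : List String).map String.toList ++ [[]] := by decide
lemma pvH12 : pvSplitSp [] pvW12.toList = (["answer", "result", "conclusion", "yields", "obtains", "gives", "produces", "leads", "reduces"] : List String).map String.toList ++ [[]] := by decide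
lemma pvH13 : pvSplitSp [] pvW13.toList = (["simplifies", "equals", "equivalent", "same", "different"] : List String).map String.toList ++ [[]] := by decide
lemma pvH14 : pvSplitSp [] pvW14.toList = (["greater", "less", "equal", "unequal", "approximately", "about", "roughly", "exactly", "precisely"] : List String).map String.toList ++ [[]] := by decide
lemma pvH15 : pvSplitSp [] pvW15.toList = (["minimum", "maximum", "extremum", "optimal", "optimization"] : List String).map String.toList := by decide

set_option maxRecDepth 8192 in
lemma pvWords_eq : pvWords = pvSingles.map String.toList := by
  have hs : pvWordsStr.toList
      = pvW1.toList ++ pvW2.toList ++ pvW3.toList ++ pvW4.toList ++ pvW5.toList ++ pvW6.toList ++ pvW7.toList ++ pvW8.toList ++ pvW9.toList ++ pvW10.toList ++ pvW11.toList ++ pvW12.toList ++ pvW13.toList ++ pvW14.toList ++ pvW15.toList := by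
    simp [pvWordsStr]
  unfold pvWords
  rw [hs]
  simp only [List.append_assoc]
  rw [pvChunk _ _ _ _ pvH1]
  rw [pvChunk _ _ _ _ pvH2]
  rw [pvChunk _ _ _ _ pvH3]
  rw [pvChunk _ _ _ _ pvH4]
  rw [pvChunk _ _ _ _ pvH5]
  rw [pvChunk _ _ _ _ pvH6]
  rw [pvChunk _ _ _ _ pvH7]
  rw [pvChunk _ _ _ _ pvH8]
  rw [pvChunk _ _ _ _ pvH9]
  rw [pvChunk _ _ _ _ pvH10]
  rw [pvChunk _ _ _ _ pvH11]
  rw [pvChunk _ _ _ _ pvH12]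
  rw [pvChunk _ _ _ _ pvH13]
  rw [pvChunk _ _ _ _ pvH14]
  rw [pvH15]
  decide

lemma pvWords_no_empty : pvWords.contains ([] : List Char) = false := by
  rw [pvWords_eq]; decide

-- the completed (space-terminated) tokens of p, starting with partial token cur
def pvTokens : List Char → List Char → List (List Char)
  | _, [] => []
  | cur, c :: p => if c = ' ' then cur :: pvTokens [] p else pvTokens (cur ++ [c]) p

lemma pvSplit_eq_tokens : ∀ (p cur : List Char),
    pvSplitSp cur (p ++ [' ']) = pvTokens cur (p ++ [' ']) ++ [[]] := by
  intro p
  induction p with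
  | nil => intro cur; simp [pvSplitSp, pvTokens]
  | cons c p ih =>
      intro cur
      by_cases hc : c = ' '
      · simp [pvSplitSp, pvTokens, hc, ih]
      · simp [pvSplitSp, pvTokens, hc, ih]

lemma pvRun (w : List Char) (hw : ' ' ∉ w) : ∀ (cur r : List Char),
    pvTokens cur (w ++ ' ' :: r) = (cur ++ w) :: pvTokens [] r := by
  induction w with
  | nil => intro cur r; simp [pvTokens]
  | cons a w ih =>
      intro cur r
      have ha : a ≠ ' ' := by intro h; exact hw (h ▸ List.mem_cons_self)
      have hw' : ' ' ∉ w := fun h => hw (List.mem_cons_of_mem a h)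
      simp [pvTokens, ha, ih hw', List.append_assoc]

lemma pvMem_of_occ (w : List Char) (hw : ' ' ∉ w) :
    ∀ (l cur r : List Char), w ∈ pvTokens cur (l ++ ' ' :: (w ++ ' ' :: r)) := by
  intro l
  induction l with
  | nil =>
      intro cur r
      simp [pvTokens, pvRun w hw]
  | cons c l ih =>
      intro cur r
      by_cases hc : c = ' '
      · simpa [pvTokens, hc] using Or.inr (ih [] r)
      · simpa [pvTokens, hc] using ih (cur ++ [c]) r

lemma pvOcc_of_mem : ∀ (p cur w : List Char), w ∈ pvTokens cur p →
    ∃ l r, cur ++ p = l ++ w ++ ' ' :: r ∧ (l = [] ∨ ∃ l', l = l' ++ [' ']) := by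
  intro p
  induction p with
  | nil => intro cur w h; simp [pvTokens] at h
  | cons c p ih =>
      intro cur w h
      by_cases hc : c = ' '
      · subst hc
        simp [pvTokens] at h
        rcases h with h | h
        · exact ⟨[], p, by simp [h], Or.inl rfl⟩
        · rcases ih [] w h with ⟨l, r, hp, hl⟩
          refine ⟨cur ++ ' ' :: l, r, ?_, Or.inr ?_⟩
          · simp at hp; simp [hp]
          · rcases hl with rfl | ⟨l', rfl⟩
            · exact ⟨cur, by simp⟩
            · exact ⟨cur ++ ' ' :: l', by simp⟩
      · simp [pvTokens, hc] at h
        rcases ih (cur ++ [c]) w h with ⟨l, r, hp, hl⟩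
        exact ⟨l, r, by simpa using hp, hl⟩

lemma pvInfix_iff_mem (w : List Char) (hw0 : w ≠ []) (hw : ' ' ∉ w) (s : List Char) :
    ((' ' :: w) ++ [' '] <:+: (' ' :: s) ++ [' ']) ↔ w ∈ pvTokens [] ((' ' :: s) ++ [' ']) := by
  constructor
  · rintro ⟨u, v, huv⟩
    have h : (' ' :: s) ++ [' '] = u ++ ' ' :: (w ++ ' ' :: v) := by
      simpa [List.append_assoc] using huv.symm
    rw [h]
    exact pvMem_of_occ w hw u [] v
  · intro hmem
    rcases pvOcc_of_mem _ [] w hmem with ⟨l, r, hp, hl⟩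
    rcases hl with rfl | ⟨l', rfl⟩
    · exfalso
      rcases w with _ | ⟨a, w'⟩
      · exact hw0 rfl
      · have : ' ' = a := by
          have := hp
          simp at this
          exact this.1
        exact hw (this ▸ List.mem_cons_self)
    · refine ⟨l', r, ?_⟩
      simp only [List.nil_append] at hp
      simp [hp, List.append_assoc]

lemma pvAny_eq (s : List Char) :
    (pvSingles.any (fun w =>
        PySem.Chars.isIn ((' ' :: w.toList) ++ [' ']) ((' ' :: s) ++ [' '])))
      = ((pvTokens [] ((' ' :: s) ++ [' '])).any (fun t => pvWords.contains t)) := by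
  rw [Bool.eq_iff_iff]
  simp only [List.any_eq_true, PySem.Chars.isIn_iff_infix, pvWords_eq, List.contains_eq_mem,
    List.mem_map, decide_eq_true_eq]
  constructor
  · rintro ⟨w, hwmem, hinf⟩
    rcases pvSingles_ok w hwmem with ⟨h0, hns⟩
    exact ⟨w.toList, (pvInfix_iff_mem _ h0 hns s).mp hinf, w, hwmem, rfl⟩
  · rintro ⟨t, htmem, w, hwmem, rfl⟩
    rcases pvSingles_ok w hwmem with ⟨h0, hns⟩
    exact ⟨w, hwmem, (pvInfix_iff_mem _ h0 hns s).mpr htmem⟩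

lemma pvBool_shuffle (a b c d : Bool) :
    ((c || (a || b)) || d) = (if a then true else if b then true else if c then true else d) := by
  cases a <;> cases b <;> cases c <;> cases d <;> rfl

-- ===== VERDICT (by name: the statement is the Claim_ definition above) =====
theorem has_text_indicators_spec : Claim_equal_has_text_indicators := by
  intro text _
  unfold Spec_has_text_indicators has_text_indicators has_text_indicators_alt
  simp only [pvIndicatorsA_eq, List.any_append,
    pvSplit_eq_tokens (' ' :: PySem.Chars.lower text.toList) [],
    List.any_cons, List.any_nil, pvWords_no_empty, Bool.or_false,
    pvAny_eq (PySem.Chars.lower text.toList)]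
  exact pvBool_shuffle _ _ _ _
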